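-- pv_equiv track=rewrite | github.com/sagisaa/Learning_FOLA | LatticeMinimization.py | agree
-- ===== SOURCE A (Python) =====
-- def agree(S, H):
--     for s1 in S:
--         for s2 in S:
--             if s1 != s2:
--                 part_s1 = list(filter(lambda p: s1 in p, H))
--                 part_s2 = list(filter(lambda p: s2 in p, H))
--                 if part_s1 != [] and part_s2 != [] and part_s1 != part_s2:
--                     return False
--     return True
-- ===== SOURCE B (Python) =====
-- def agree(S, H):
--     first = None
--     for s in S:
--         m = [p for p in H if s in p]
--         if m:
--             if first is None:
--                 first = m
--             elif m != first:
--                 return False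
--     return True
-- ===== Notes on version B (the rewrite author's own statement) =====
-- stated objective: faster
-- what changed: single pass computing each element's part-membership list once and comparing it to the first nonempty one, instead of recomputing both membership lists for every ordered pair of elements
import Mathlib
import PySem

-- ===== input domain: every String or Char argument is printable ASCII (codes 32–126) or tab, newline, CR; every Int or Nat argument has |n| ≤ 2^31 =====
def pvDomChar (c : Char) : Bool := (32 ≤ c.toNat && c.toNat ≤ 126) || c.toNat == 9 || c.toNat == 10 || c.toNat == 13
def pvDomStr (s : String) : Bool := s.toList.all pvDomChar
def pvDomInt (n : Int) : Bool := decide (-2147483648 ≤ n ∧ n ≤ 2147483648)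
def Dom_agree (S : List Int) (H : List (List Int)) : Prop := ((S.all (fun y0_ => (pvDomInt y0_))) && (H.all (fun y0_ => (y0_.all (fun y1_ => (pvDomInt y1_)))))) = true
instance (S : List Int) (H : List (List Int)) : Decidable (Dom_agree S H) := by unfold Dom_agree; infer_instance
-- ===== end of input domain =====

-- B replaces A's pairwise O(|S|^2) rescan by one pass that computes each element's
-- part-membership list once and compares it to the first nonempty one (objective: faster).

-- ===== PORT A =====
-- part_s = list(filter(lambda p: s in p, H))
def pvParts (H : List (List Int)) (s : Int) : List (List Int) :=
  H.filter (fun p => decide (s ∈ p))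

def agree (S : List Int) (H : List (List Int)) : Bool :=
  -- nested for-loops with early `return False` = nested List.all
  S.all (fun s1 => S.all (fun s2 =>
    if s1 ≠ s2 then
      let part_s1 := pvParts H s1
      let part_s2 := pvParts H s2
      if part_s1 ≠ [] ∧ part_s2 ≠ [] ∧ part_s1 ≠ part_s2 then false else true
    else true))

-- ===== PORT B =====
-- the loop of Source B, carrying `first : Option _` (None = no nonempty mask seen yet)
def agreeAltLoop (H : List (List Int)) (first : Option (List (List Int))) :
    List Int → Bool
  | [] => true
  | s :: rest =>
    let m := pvParts H s
    if m = [] then agreeAltLoop H first rest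
    else
      match first with
      | none => agreeAltLoop H (some m) rest
      | some f => if m ≠ f then false else agreeAltLoop H first rest

def agree_alt (S : List Int) (H : List (List Int)) : Bool :=
  agreeAltLoop H none S

-- ===== PRECONDITION & SPEC =====
def Spec_agree (S : List Int) (H : List (List Int)) (out : Bool) : Prop := out = agree_alt S H
instance (S : List Int) (H : List (List Int)) (out : Bool) : Decidable (Spec_agree S H out) := by unfold Spec_agree; infer_instance

-- ===== CLAIM (what is proved, stated in full; the proofs are below) =====
def Claim_equal_agree : Prop := ∀ (S : List Int) (H : List (List Int)), Dom_agree S H → Spec_agree S H (agree S H)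

-- ===== LEMMAS AND PROOFS =====

-- the common characterisation: all nonempty membership lists coincide
def AllAgree (S : List Int) (H : List (List Int)) : Prop :=
  ∀ s1 ∈ S, ∀ s2 ∈ S, pvParts H s1 ≠ [] → pvParts H s2 ≠ [] → pvParts H s1 = pvParts H s2

lemma agree_iff (S : List Int) (H : List (List Int)) :
    agree S H = true ↔ AllAgree S H := by
  unfold agree AllAgree
  simp only [List.all_eq_true]
  constructor
  · intro h s1 h1 s2 h2 hn1 hn2
    by_cases he : s1 = s2
    · subst he; rfl
    · have hne : s1 ≠ s2 := he
      have := h s1 h1 s2 h2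
      rw [if_pos hne] at this
      by_cases hc : pvParts H s1 ≠ [] ∧ pvParts H s2 ≠ [] ∧ pvParts H s1 ≠ pvParts H s2
      · rw [if_pos hc] at this
        exact absurd this (by simp)
      · push Not at hc
        exact hc hn1 hn2
  · intro h s1 h1 s2 h2
    split_ifs with he hc
    · exact absurd (hc.2.2) (by simp [h s1 h1 s2 h2 hc.1 hc.2.1])
    · rfl
    · rfl

lemma loop_some (H : List (List Int)) (f : List (List Int)) (S : List Int) :
    agreeAltLoop H (some f) S = true ↔ ∀ s ∈ S, pvParts H s ≠ [] → pvParts H s = f := by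
  induction S with
  | nil => simp [agreeAltLoop]
  | cons s rest ih =>
    simp only [agreeAltLoop]
    by_cases hm : pvParts H s = []
    · rw [if_pos hm, ih]
      constructor
      · intro h t ht hnt
        rcases List.mem_cons.mp ht with rfl | ht
        · exact absurd hm hnt
        · exact h t ht hnt
      · intro h t ht hnt
        exact h t (List.mem_cons_of_mem _ ht) hnt
    · rw [if_neg hm]
      show (if pvParts H s ≠ f then false else agreeAltLoop H (some f) rest) = true ↔ _
      by_cases hf : pvParts H s = f
      · rw [if_neg (not_not_intro hf), ih]
        constructor
        · intro h t ht hnt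
          rcases List.mem_cons.mp ht with rfl | ht
          · exact hf
          · exact h t ht hnt
        · intro h t ht hnt
          exact h t (List.mem_cons_of_mem _ ht) hnt
      · rw [if_pos hf]
        constructor
        · intro h; exact absurd h (by simp)
        · intro h
          exact absurd (h s (List.mem_cons_self ..) hm) hf

lemma loop_none (H : List (List Int)) (S : List Int) :
    agreeAltLoop H none S = true ↔ AllAgree S H := by
  induction S with
  | nil =>
    simp [agreeAltLoop, AllAgree]
  | cons s rest ih =>
    simp only [agreeAltLoop]
    by_cases hm : pvParts H s = []
    · rw [if_pos hm, ih]
      unfold AllAgree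
      constructor
      · intro h s1 h1 s2 h2 hn1 hn2
        rcases List.mem_cons.mp h1 with rfl | h1
        · exact absurd hm hn1
        rcases List.mem_cons.mp h2 with rfl | h2
        · exact absurd hm hn2
        exact h s1 h1 s2 h2 hn1 hn2
      · intro h s1 h1 s2 h2 hn1 hn2
        exact h s1 (List.mem_cons_of_mem _ h1) s2 (List.mem_cons_of_mem _ h2) hn1 hn2
    · rw [if_neg hm, loop_some]
      unfold AllAgree
      constructor
      · intro h s1 h1 s2 h2 hn1 hn2
        have e1 : pvParts H s1 = pvParts H s := by
          rcases List.mem_cons.mp h1 with rfl | h1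
          · rfl
          · exact h s1 h1 hn1
        have e2 : pvParts H s2 = pvParts H s := by
          rcases List.mem_cons.mp h2 with rfl | h2
          · rfl
          · exact h s2 h2 hn2
        rw [e1, e2]
      · intro h t ht hnt
        exact h t (List.mem_cons_of_mem _ ht) s (List.mem_cons_self ..) hnt hm

-- ===== VERDICT (by name: the statement is the Claim_ definition above) =====
theorem agree_spec : Claim_equal_agree := by
  intro S H _
  unfold Spec_agree agree_alt
  rw [← Bool.coe_iff_coe, agree_iff, loop_none]
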